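-- pv_equiv track=rewrite | github.com/pypi-data/pypi-mirror-383 | packages/odoo-typing-classes-generator/odoo_typing_classes_generator-17.0.0.0.2-py3-none-any.whl/odoo_typing_classes_generator/core/models.py | _snake_case_to_pascal_case
-- ===== SOURCE A (Python) =====
-- def _snake_case_to_pascal_case(snake_case_str: str) -> str:
--     """
--     Converts a snake_case string to PascalCase.
--     """
--     pascal_case_str = ""
--     for word in snake_case_str.split("_"):
--         if not word:
--             continue
--         pascal_case_str += word[0].upper()
--         if len(word) > 1:
--             pascal_case_str += word[1:]
--     return pascal_case_str
-- ===== SOURCE B (Python) =====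
-- def _snake_case_to_pascal_case(snake_case_str: str) -> str:
--     """
--     Converts a snake_case string to PascalCase by a single stateful scan
--     (no splitting): '_' re-arms the uppercase flag, the first character of
--     each run is uppercased, the rest are copied unchanged.
--     """
--     out = []
--     at_start = True
--     for c in snake_case_str:
--         if c == "_":
--             at_start = True
--         elif at_start:
--             out.append(c.upper())
--             at_start = False
--         else:
--             out.append(c)
--     return "".join(out)
-- ===== Notes on version B (the rewrite author's own statement) =====
-- stated objective: alternative
-- what changed: Replaces split-on-underscore plus per-word string concatenation with a single character scan carrying an at-start boolean flag.
import Mathlib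
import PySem

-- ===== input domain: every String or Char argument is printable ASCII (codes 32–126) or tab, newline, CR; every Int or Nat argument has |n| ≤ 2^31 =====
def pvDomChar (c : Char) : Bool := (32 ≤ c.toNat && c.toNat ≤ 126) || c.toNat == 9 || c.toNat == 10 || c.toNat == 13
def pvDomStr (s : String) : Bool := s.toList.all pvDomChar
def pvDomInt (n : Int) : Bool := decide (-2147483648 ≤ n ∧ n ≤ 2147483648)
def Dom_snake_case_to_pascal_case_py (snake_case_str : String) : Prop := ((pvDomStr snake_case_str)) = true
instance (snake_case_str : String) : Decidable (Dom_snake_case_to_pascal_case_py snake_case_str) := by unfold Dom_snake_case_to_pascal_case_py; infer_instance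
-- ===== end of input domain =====

-- B replaces A's split-on-'_' + per-word concatenation with a single character scan
-- carrying an at-start boolean flag (objective: alternative decomposition).

-- ===== PORT A =====
-- one body of A's loop: skip empty words, else append word[0].upper(), and word[1:] if len(word) > 1
def pyWordStep (acc word : List Char) : List Char :=
  match word with
  | [] => acc          -- if not word: continue
  | w0 :: _ =>
    let acc1 := acc ++ [PySem.Chars.upperChar w0]                              -- word[0].upper()
    if 1 < word.length then acc1 ++ PySem.List.slice word (some 1) none else acc1  -- word[1:]

def snake_case_to_pascal_case_py (snake_case_str : String) : String :=
  String.ofList ((PySem.Chars.splitOn snake_case_str.toList ['_']).foldl pyWordStep [])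

-- ===== PORT B =====
-- B's loop body: '_' re-arms the flag; otherwise emit the char (uppercased when flag set)
def altStep (st : List Char × Bool) (c : Char) : List Char × Bool :=
  if c = '_' then (st.1, true)
  else if st.2 then (st.1 ++ [PySem.Chars.upperChar c], false)
  else (st.1 ++ [c], false)

def snake_case_to_pascal_case_py_alt (snake_case_str : String) : String :=
  String.ofList (snake_case_str.toList.foldl altStep ([], true)).1

-- ===== PRECONDITION & SPEC =====
def Spec_snake_case_to_pascal_case_py (snake_case_str : String) (out : String) : Prop := out = snake_case_to_pascal_case_py_alt snake_case_str
instance (snake_case_str : String) (out : String) : Decidable (Spec_snake_case_to_pascal_case_py snake_case_str out) := by unfold Spec_snake_case_to_pascal_case_py; infer_instance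

-- ===== CLAIM (what is proved, stated in full; the proofs are below) =====
def Claim_equal_snake_case_to_pascal_case_py : Prop := ∀ (snake_case_str : String), Dom_snake_case_to_pascal_case_py snake_case_str → Spec_snake_case_to_pascal_case_py snake_case_str (snake_case_to_pascal_case_py snake_case_str)

-- ===== LEMMAS AND PROOFS =====

-- a fuel-free reformulation of PySem.Chars.splitOn for the single-char separator '_'
def splitU : List Char → List Char → List (List Char)
  | [], cur => [cur.reverse]
  | c :: rest, cur => if c = '_' then cur.reverse :: splitU rest [] else splitU rest (c :: cur)

lemma splitOn_go_eq (fuel : Nat) (l cur : List Char) (acc2 : List (List Char))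
    (h : l.length < fuel) :
    PySem.Chars.splitOn.go ['_'] fuel l cur acc2 = acc2.reverse ++ splitU l cur := by
  induction fuel generalizing l cur acc2 with
  | zero => omega
  | succ f ih =>
    cases l with
    | nil => simp [PySem.Chars.splitOn.go, splitU]
    | cons c rest =>
      by_cases hc : c = '_'
      · subst hc
        simp only [PySem.Chars.splitOn.go, List.isPrefixOf, BEq.rfl, Bool.and_eq_true]
        rw [ih _ _ _ (by simp at h ⊢; omega)]
        simp [splitU]
      · have hpre : List.isPrefixOf ['_'] (c :: rest) = false := by
          show ('_' == c && List.isPrefixOf ([] : List Char) rest) = false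
          simp [beq_eq_false_iff_ne]
          exact fun h => hc h.symm
        simp only [PySem.Chars.splitOn.go, hpre, Bool.false_eq_true, if_false]
        rw [ih _ _ _ (by simp at h ⊢; omega)]
        simp [splitU, hc]

lemma splitOn_eq_splitU (l : List Char) :
    PySem.Chars.splitOn l ['_'] = splitU l [] := by
  have := splitOn_go_eq (l.length + 1) l [] [] (by omega)
  simpa [PySem.Chars.splitOn] using this

-- splitU with a pending accumulator prefixes the reversed accumulator onto the first word
lemma splitU_cur (l : List Char) (cur : List Char) :
    splitU l cur = (cur.reverse ++ (splitU l []).headI) :: (splitU l []).tail := by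
  induction l generalizing cur with
  | nil => simp [splitU]
  | cons c rest ih =>
    by_cases hc : c = '_'
    · simp [splitU, hc]
    · simp only [splitU, hc, if_false]
      rw [ih (c :: cur), ih [c]]
      simp

-- A's per-word output, acc-free
def wordOut : List Char → List Char
  | [] => []
  | w0 :: wr => PySem.Chars.upperChar w0 :: wr

lemma pyWordStep_eq (acc word : List Char) : pyWordStep acc word = acc ++ wordOut word := by
  cases word with
  | nil => simp [pyWordStep, wordOut]
  | cons w0 wr =>
    cases wr with
    | nil => simp [pyWordStep, wordOut]
    | cons w1 wt =>
      simp [pyWordStep, wordOut, PySem.List.slice_from]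

lemma foldl_pyWordStep (ws : List (List Char)) (acc : List Char) :
    ws.foldl pyWordStep acc = acc ++ (ws.map wordOut).flatten := by
  induction ws generalizing acc with
  | nil => simp
  | cons w t ih => simp [List.foldl_cons, pyWordStep_eq, ih, List.append_assoc]

-- B's scan, acc-free
def altGo : List Char → Bool → List Char
  | [], _ => []
  | c :: rest, atStart =>
    if c = '_' then altGo rest true
    else (if atStart then PySem.Chars.upperChar c else c) :: altGo rest false

lemma foldl_altStep (cs : List Char) (out : List Char) (b : Bool) :
    (cs.foldl altStep (out, b)).1 = out ++ altGo cs b := by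
  induction cs generalizing out b with
  | nil => simp [altGo]
  | cons c rest ih =>
    by_cases hc : c = '_'
    · simp [altStep, altGo, hc, ih]
    · cases b <;> simp [altStep, altGo, hc, ih, List.append_assoc]

-- the core correspondence between A's word-wise fold and B's scan
lemma altGo_eq_splitU (cs : List Char) :
    altGo cs true = ((splitU cs []).map wordOut).flatten ∧
    altGo cs false = (splitU cs []).headI ++ (((splitU cs []).tail).map wordOut).flatten := by
  induction cs with
  | nil => simp [altGo, splitU, wordOut]
  | cons c rest ih =>
    by_cases hc : c = '_'
    · simp [altGo, splitU, hc, ih.1, wordOut]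
    · have hsplit : splitU (c :: rest) [] =
          (c :: (splitU rest []).headI) :: (splitU rest []).tail := by
        simp only [splitU, hc, if_false]
        simpa using splitU_cur rest [c]
      constructor
      · simp [altGo, hc, ih.2, hsplit, wordOut]
      · simp [altGo, hc, ih.2, hsplit]

-- ===== VERDICT (by name: the statement is the Claim_ definition above) =====
theorem snake_case_to_pascal_case_py_spec : Claim_equal_snake_case_to_pascal_case_py := by
  intro s _
  show snake_case_to_pascal_case_py s = snake_case_to_pascal_case_py_alt s
  unfold snake_case_to_pascal_case_py snake_case_to_pascal_case_py_alt
  rw [splitOn_eq_splitU, foldl_pyWordStep, foldl_altStep]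
  simp [(altGo_eq_splitU s.toList).1]
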